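-- pv_equiv track=rewrite | github.com/UofT-CSC490-F2025/Immigreat | scripts/profile_functions.py | synthetic_text
-- ===== SOURCE A (Python) =====
-- def synthetic_text(n_chars: int = 200_000) -> str:
--     sentence = (
--         "This is a synthetic sentence meant to approximate realistic text with punctuation. "
--     )
--     parts = []
--     total = 0
--     while total < n_chars:
--         parts.append(sentence)
--         total += len(sentence)
--     return "".join(parts)
-- ===== SOURCE B (Python) =====
-- def synthetic_text(n_chars: int = 200_000) -> str:
--     sentence = (
--         "This is a synthetic sentence meant to approximate realistic text with punctuation. "
--     )
--     reps = max(0, -(-n_chars // len(sentence)))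
--     return sentence * reps
-- ===== Notes on version B (the rewrite author's own statement) =====
-- stated objective: simpler
-- what changed: Replaces the accumulate-and-join loop with a closed-form ceiling division: reps = max(0, ceil(n_chars/len(sentence))) and a single string repetition.
import Mathlib
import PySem

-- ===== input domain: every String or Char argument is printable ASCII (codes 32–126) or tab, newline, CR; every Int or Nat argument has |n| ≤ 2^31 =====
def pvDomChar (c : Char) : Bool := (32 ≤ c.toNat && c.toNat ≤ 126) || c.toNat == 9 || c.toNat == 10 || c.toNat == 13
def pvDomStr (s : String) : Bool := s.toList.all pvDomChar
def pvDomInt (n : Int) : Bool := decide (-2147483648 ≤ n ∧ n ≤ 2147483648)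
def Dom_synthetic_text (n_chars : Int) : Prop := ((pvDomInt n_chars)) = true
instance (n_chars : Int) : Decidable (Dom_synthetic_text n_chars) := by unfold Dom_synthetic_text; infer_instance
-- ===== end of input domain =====

-- B replaces A's accumulate-and-join while-loop by a closed-form ceiling division and one repetition (objective: simpler).

-- the sentence literal both Pythons contain
def pvSentence : String :=
  "This is a synthetic sentence meant to approximate realistic text with punctuation. "

-- ===== PORT A =====
-- the while-loop: while total < n_chars: parts.append(sentence); total += len(sentence)
def pvLoopA (n total : Int) (parts : List String) : List String :=
  if total < n then
    pvLoopA n (total + PySem.Str.len pvSentence) (parts ++ [pvSentence])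
  else parts
termination_by (n - total).toNat
decreasing_by
  have h : PySem.Str.len pvSentence = 83 := by decide
  rw [h]; omega

def synthetic_text (n_chars : Int) : String :=
  PySem.Str.join "" (pvLoopA n_chars 0 [])

-- ===== PORT B =====
def synthetic_text_alt (n_chars : Int) : String :=
  let reps : Int := max 0 (-(PySem.Int.floordiv (-n_chars) (PySem.Str.len pvSentence)))
  String.ofList (PySem.List.pyRepeat pvSentence.toList reps)   -- sentence * reps

-- ===== PRECONDITION & SPEC =====
def Spec_synthetic_text (n_chars : Int) (out : String) : Prop := out = synthetic_text_alt n_chars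
instance (n_chars : Int) (out : String) : Decidable (Spec_synthetic_text n_chars out) := by unfold Spec_synthetic_text; infer_instance

-- ===== CLAIM (what is proved, stated in full; the proofs are below) =====
def Claim_equal_synthetic_text : Prop := ∀ (n_chars : Int), Dom_synthetic_text n_chars → Spec_synthetic_text n_chars (synthetic_text n_chars)

-- ===== LEMMAS AND PROOFS =====

-- number of loop iterations remaining when n - total = d : ceil(d/83), clamped at 0
def pvReps (d : Int) : Nat := (-(PySem.Int.floordiv (-d) 83)).toNat

theorem pvReps_succ (d : Int) (hd : 0 < d) : pvReps d = pvReps (d - 83) + 1 := by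
  unfold pvReps
  rw [PySem.Int.floordiv_eq_ediv_of_pos (by norm_num : (0:Int) < 83),
      PySem.Int.floordiv_eq_ediv_of_pos (by norm_num : (0:Int) < 83)]
  omega

theorem pvReps_zero (d : Int) (hd : d ≤ 0) : pvReps d = 0 := by
  unfold pvReps
  rw [PySem.Int.floordiv_eq_ediv_of_pos (by norm_num : (0:Int) < 83)]
  omega

theorem pvLoopA_eq (n : Int) : ∀ (total : Int) (parts : List String),
    pvLoopA n total parts = parts ++ List.replicate (pvReps (n - total)) pvSentence := by
  intro total parts
  induction total, parts using pvLoopA.induct n with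
  | case1 total parts h ih =>
    rw [pvLoopA, if_pos h, ih]
    have hl : PySem.Str.len pvSentence = 83 := by decide
    rw [hl, pvReps_succ (n - total) (by omega)]
    have he : n - (total + 83) = n - total - 83 := by ring
    rw [he, List.replicate_succ]
    simp
  | case2 total parts h =>
    rw [pvLoopA, if_neg h, pvReps_zero (n - total) (by omega)]
    simp

theorem pvJoinNil (l : List (List Char)) : PySem.Chars.join [] l = l.flatten := by
  induction l with
  | nil => simp [PySem.Chars.join_nil]
  | cons p rest ih =>
    cases rest with
    | nil => simp [PySem.Chars.join_singleton]
    | cons q r => rw [PySem.Chars.join_cons_cons, ih]; simp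

theorem synthetic_text_spec : Claim_equal_synthetic_text := by
  intro n _
  unfold Spec_synthetic_text synthetic_text synthetic_text_alt
  rw [pvLoopA_eq n 0 []]
  have hl : PySem.Str.len pvSentence = 83 := by decide
  apply String.toList_injective
  simp only [hl, List.nil_append, PySem.Str.toList_join, String.toList_ofList,
    PySem.List.pyRepeat, List.map_replicate]
  have hk : (max 0 (-(PySem.Int.floordiv (-n) 83))).toNat = pvReps (n - 0) := by
    unfold pvReps
    rw [PySem.Int.floordiv_eq_ediv_of_pos (by norm_num : (0:Int) < 83),
        PySem.Int.floordiv_eq_ediv_of_pos (by norm_num : (0:Int) < 83)]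
    omega
  rw [hk]
  exact pvJoinNil _
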